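-- pv_equiv track=rewrite | github.com/SJPark97/Algorithm | 12_Solve/04_2105_디저트_카페/test.py | a
-- ===== SOURCE A (Python) =====
-- def a(x, y, t, dessert_list):
--     for _ in range(t):
--         x, y = x + dx[0], y + dy[0]
--         if 0 <= x < n and 0 <= y < n:
--             dessert_list.append((x, y))
--         else:
--             return False
--     return True
--
-- dx = [-1, 1, 0, 0]
--
-- dy = [0, 0, -1, 1]
--
-- n = 4
-- ===== SOURCE B (Python) =====
-- dx = [-1, 1, 0, 0]
-- dy = [0, 0, -1, 1]
-- n = 4
--
-- def a(x, y, t, dessert_list):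
--     # Arithmetic prefix: the walk goes straight left, so the valid prefix
--     # length m is min(t, x) when the start column/row admit any step, else 0.
--     if t <= 0:
--         return True
--     if not (0 <= y < n and 1 <= x <= n):
--         return False
--     m = min(t, x)
--     dessert_list.extend((x - k, y) for k in range(1, m + 1))
--     return m == t
-- ===== Notes on version B (the rewrite author's own statement) =====
-- stated objective: simpler
-- what changed: Replaces the step-by-step check-and-append loop by an arithmetic computation of the valid prefix length m = min(t, x) (the walk moves straight left, so the bounds are monotone), followed by one batch extend and the comparison m == t.
import Mathlib
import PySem

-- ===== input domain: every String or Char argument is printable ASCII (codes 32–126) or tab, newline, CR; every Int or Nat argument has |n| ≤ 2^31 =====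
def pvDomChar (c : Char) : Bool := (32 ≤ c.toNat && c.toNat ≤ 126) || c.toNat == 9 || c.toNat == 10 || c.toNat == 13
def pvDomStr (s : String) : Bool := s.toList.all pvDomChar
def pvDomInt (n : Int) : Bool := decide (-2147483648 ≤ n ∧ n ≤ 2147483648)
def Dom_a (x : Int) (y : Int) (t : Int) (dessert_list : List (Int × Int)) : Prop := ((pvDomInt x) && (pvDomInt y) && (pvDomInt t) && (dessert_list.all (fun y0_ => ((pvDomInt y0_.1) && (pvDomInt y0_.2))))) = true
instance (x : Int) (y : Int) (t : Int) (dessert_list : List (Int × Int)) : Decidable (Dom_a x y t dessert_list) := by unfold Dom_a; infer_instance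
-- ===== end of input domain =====

-- B computes the valid prefix length arithmetically (min t x) instead of stepping;
-- equivalence is about the RETURN value only (both Pythons perform the same list mutation).
-- ===== PORT A =====
-- loop 'for _ in range(t)' with early return False, state (x, y, dessert_list)
def aRec : Nat → Int → Int → List (Int × Int) → Bool
  | 0, _, _, _ => true
  | Nat.succ f, x, y, ds =>
    let x' := x + (-1)
    let y' := y + 0
    if 0 ≤ x' ∧ x' < 4 ∧ 0 ≤ y' ∧ y' < 4 then
      aRec f x' y' (ds ++ [(x', y')])
    else
      false

def a (x : Int) (y : Int) (t : Int) (dessert_list : List (Int × Int)) : Bool :=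
  aRec t.toNat x y dessert_list

-- ===== PORT B =====
def a_alt (x : Int) (y : Int) (t : Int) (_dessert_list : List (Int × Int)) : Bool :=
  if t ≤ 0 then true
  else if ¬(0 ≤ y ∧ y < 4 ∧ 1 ≤ x ∧ x ≤ 4) then false
  else min t x == t

-- ===== PRECONDITION & SPEC =====
def Spec_a (x : Int) (y : Int) (t : Int) (dessert_list : List (Int × Int)) (out : Bool) : Prop := out = a_alt x y t dessert_list
instance (x : Int) (y : Int) (t : Int) (dessert_list : List (Int × Int)) (out : Bool) : Decidable (Spec_a x y t dessert_list out) := by unfold Spec_a; infer_instance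

-- ===== CLAIM (what is proved, stated in full; the proofs are below) =====
def Claim_equal_a : Prop := ∀ (x : Int) (y : Int) (t : Int) (dessert_list : List (Int × Int)), Dom_a x y t dessert_list → Spec_a x y t dessert_list (a x y t dessert_list)

-- ===== LEMMAS AND PROOFS =====
theorem aRec_eq (f : Nat) : ∀ (x y : Int) (ds : List (Int × Int)),
    aRec f x y ds = decide (f = 0 ∨ (0 ≤ y ∧ y < 4 ∧ (f : Int) ≤ x ∧ x ≤ 4)) := by
  induction f with
  | zero => intro x y ds; simp [aRec]
  | succ f ih =>
    intro x y ds
    simp only [aRec, ih]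
    by_cases h : 0 ≤ x + (-1) ∧ x + (-1) < 4 ∧ 0 ≤ y + 0 ∧ y + 0 < 4
    · rw [if_pos h, decide_eq_decide]
      constructor
      · rintro (rfl | ⟨h1, h2, h3, h4⟩) <;>
          exact Or.inr ⟨by omega, by omega, by push_cast; omega, by omega⟩
      · rintro (h0 | ⟨h1, h2, h3, h4⟩)
        · exact absurd h0 (Nat.succ_ne_zero f)
        · by_cases hf : f = 0
          · exact Or.inl hf
          · have hf1 : (1 : Int) ≤ (f : Int) := by
              exact_mod_cast Nat.one_le_iff_ne_zero.mpr hf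
            push_cast at h3
            exact Or.inr ⟨by omega, by omega, by omega, by omega⟩
    · rw [if_neg h]
      symm
      rw [decide_eq_false_iff_not]
      rintro (h0 | ⟨h1, h2, h3, h4⟩)
      · exact absurd h0 (Nat.succ_ne_zero f)
      · push_cast at h3
        exact h ⟨by omega, by omega, by omega, by omega⟩

-- ===== VERDICT (by name: the statement is the Claim_ definition above) =====
theorem a_spec : Claim_equal_a := by
  intro x y t ds _
  unfold Spec_a a a_alt
  rw [aRec_eq]
  split_ifs with h1 h2
  · rw [decide_eq_true_iff]
    exact Or.inl (by omega)
  · obtain ⟨c1, c2, c3, c4⟩ := h2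
    rw [Bool.eq_iff_iff]
    simp only [decide_eq_true_eq, beq_iff_eq]
    constructor
    · rintro (h0 | ⟨_, _, h3, _⟩)
      · omega
      · omega
    · intro hmin
      exact Or.inr ⟨c1, c2, by omega, c4⟩
  · rw [decide_eq_false_iff_not]
    rintro (h0 | ⟨c1, c2, c3, c4⟩)
    · omega
    · exact h2 ⟨c1, c2, by omega, c4⟩
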